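-- pv_equiv track=rewrite | github.com/duncan-stuart/bitGale | bitGale.py | rgb_offset
-- ===== SOURCE A (Python) =====
-- def rgb_offset(array, mode):
--     # Interpret mode input as the index to operate on in each pixel
--     channel = 0 if mode == 'r' else 1 if mode == 'g' else 2 if mode == 'b' else 0
--
--     # Take the first pixel value, and bubble it through all rows to the end of the image (shifting all values one left)
--     for y in range(len(array)):
--         firstPixel = array[y][0]
--         for x in range(len(array[y])):
--             array[y][x][channel], firstPixel[channel] = firstPixel[channel], array[y][x][channel]
--         if y == len(array):  #
--             array[y][len(array[y])-1][channel], array[y+1][0][channel] = array[y+1][0][channel], array[y][len(array[y])-1][channel]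
--     return array
-- ===== SOURCE B (Python) =====
-- def rgb_offset(array, mode):
--     channel = 0 if mode == 'r' else 1 if mode == 'g' else 2 if mode == 'b' else 0
--     for row in array:
--         vals = [p[channel] for p in row]
--         rotated = [vals[-1]] + vals[:-1]
--         for p, v in zip(row, rotated):
--             p[channel] = v
--     return array
-- ===== Notes on version B (the rewrite author's own statement) =====
-- stated objective: simpler
-- what changed: B replaces A's aliasing swap-bubbling pass (repeated simultaneous swaps through row[0]) with a plain three-step per-row decomposition: extract the channel values, rotate the list right by one, write the rotated values back.
import Mathlib
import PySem

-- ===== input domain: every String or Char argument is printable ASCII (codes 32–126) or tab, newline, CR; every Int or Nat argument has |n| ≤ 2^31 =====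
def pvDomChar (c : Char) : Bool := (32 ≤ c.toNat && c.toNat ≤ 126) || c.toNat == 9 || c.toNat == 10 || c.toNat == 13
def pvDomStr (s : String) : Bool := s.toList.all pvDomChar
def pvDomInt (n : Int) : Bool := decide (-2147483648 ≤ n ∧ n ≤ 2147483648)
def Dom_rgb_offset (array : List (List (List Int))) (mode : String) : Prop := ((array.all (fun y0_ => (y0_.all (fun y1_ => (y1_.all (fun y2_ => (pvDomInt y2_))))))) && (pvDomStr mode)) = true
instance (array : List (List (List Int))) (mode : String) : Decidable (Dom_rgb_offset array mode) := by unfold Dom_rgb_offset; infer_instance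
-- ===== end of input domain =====

-- B replaces A's per-row swap-bubbling (simultaneous swaps through an alias of row[0]) with
-- extract-channel / rotate-right / write-back; equal return value on Pre_ (A and B mutate the
-- pixel lists in place in Python; the equivalence proved here is about the returned value).


-- ===== PORT A =====
-- the simultaneous swap  array[y][x][channel], firstPixel[channel] = firstPixel[channel], array[y][x][channel]
-- where firstPixel is an ALIAS of row[0]; hence both reads/writes go through the row state r
def pvSwapStep (ch : Nat) (r : List (List Int)) (x : Nat) : List (List Int) :=
  let fp := (r.getD 0 []).getD ch 0
  let old := (r.getD x []).getD ch 0
  let r1 := r.set x ((r.getD x []).set ch fp)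
  r1.set 0 ((r1.getD 0 []).set ch old)

-- A's inner loop: for x in range(len(array[y])): swap
def pvRowA (ch : Nat) (row : List (List Int)) : List (List Int) :=
  (List.range row.length).foldl (pvSwapStep ch) row

-- A's loop body for one y, including the (unreachable: y < len(array)) 'if y == len(array)' branch
def pvOuterStepA (ch : Nat) (arr : List (List (List Int))) (y : Nat) : List (List (List Int)) :=
  let arr1 := arr.set y (pvRowA ch (arr.getD y []))
  if y == arr1.length then
    let rowy := arr1.getD y []
    let rowy1 := arr1.getD (y + 1) []
    let aval := (rowy.getD (rowy.length - 1) []).getD ch 0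
    let bval := (rowy1.getD 0 []).getD ch 0
    let arr2 := arr1.set y (rowy.set (rowy.length - 1) ((rowy.getD (rowy.length - 1) []).set ch bval))
    arr2.set (y + 1) ((arr2.getD (y + 1) []).set 0 (((arr2.getD (y + 1) []).getD 0 []).set ch aval))
  else arr1

def rgb_offset (array : List (List (List Int))) (mode : String) : List (List (List Int)) :=
  let channel := if mode == "r" then 0 else if mode == "g" then 1 else if mode == "b" then 2 else 0
  (List.range array.length).foldl (pvOuterStepA channel) array

-- ===== PORT B =====
-- per-row: vals = [p[channel] for p in row]; rotated = [vals[-1]] + vals[:-1]  (exact for nonempty vals);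
-- write back via zip
def pvRowB (ch : Nat) (row : List (List Int)) : List (List Int) :=
  let vals := row.map (fun p => p.getD ch 0)
  let rotated := vals.getLastD 0 :: vals.dropLast
  (row.zip rotated).map (fun pv => pv.1.set ch pv.2)

def rgb_offset_alt (array : List (List (List Int))) (mode : String) : List (List (List Int)) :=
  let channel := if mode == "r" then 0 else if mode == "g" then 1 else if mode == "b" then 2 else 0
  array.map (pvRowB channel)

-- ===== PRECONDITION & SPEC =====
def pvChan (mode : String) : Nat := if mode == "r" then 0 else if mode == "g" then 1 else if mode == "b" then 2 else 0

-- Pre_ excludes exactly the inputs where Python A raises IndexError: an empty row (array[y][0])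
-- or a pixel shorter than channel+1 (pixel[channel])
def Pre_rgb_offset (array : List (List (List Int))) (mode : String) : Prop :=
  ∀ row ∈ array, row ≠ [] ∧ ∀ p ∈ row, pvChan mode < p.length
instance (array : List (List (List Int))) (mode : String) : Decidable (Pre_rgb_offset array mode) := by unfold Pre_rgb_offset; infer_instance

def pvWitness_rgb_offset : List (List (List Int)) × String := ([[[1, 2, 3], [4, 5, 6]], [[7, 8, 9]]], "g")

def Spec_rgb_offset (array : List (List (List Int))) (mode : String) (out : List (List (List Int))) : Prop := out = rgb_offset_alt array mode
instance (array : List (List (List Int))) (mode : String) (out : List (List (List Int))) : Decidable (Spec_rgb_offset array mode out) := by unfold Spec_rgb_offset; infer_instance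

-- ===== CLAIM (what is proved, stated in full; the proofs are below) =====
def Claim_equal_rgb_offset : Prop := ∀ (array : List (List (List Int))) (mode : String), Dom_rgb_offset array mode → Pre_rgb_offset array mode → Spec_rgb_offset array mode (rgb_offset array mode)

-- ===== LEMMAS AND PROOFS =====

theorem pv_getD_append {α : Type} (l : List α) (x : α) (r : List α) (d : α) :
    (l ++ x :: r).getD l.length d = x := by
  induction l with
  | nil => rfl
  | cons a t ih => simpa using ih

theorem pv_set_append {α : Type} (l : List α) (x y : α) (r : List α) :
    (l ++ x :: r).set l.length y = l ++ y :: r := by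
  induction l with
  | nil => rfl
  | cons a t ih => simpa using ih

-- invariant of A's inner loop: after the first (done.length+1) iterations the state is
-- a :: done ++ ps and the remaining iterations right-rotate the channel through a
theorem pvRowA_inv (ch : Nat) (ps : List (List Int)) :
    ∀ (done : List (List Int)) (a : List Int), ch < a.length →
      (∀ p ∈ ps, ch < p.length) →
      List.foldl (pvSwapStep ch) (a :: done ++ ps) (List.range' (done.length + 1) ps.length) =
        (a.set ch ((ps.map (fun p => p.getD ch 0)).getLastD (a.getD ch 0))) :: done ++
          (ps.zip (a.getD ch 0 :: (ps.map (fun p => p.getD ch 0)).dropLast)).map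
            (fun pv => pv.1.set ch pv.2) := by
  induction ps with
  | nil =>
    intro done a ha _
    simp [List.getD, List.getElem?_eq_getElem ha, List.set_getElem_self]
  | cons p ps' ih =>
    intro done a ha hp
    have hstep : pvSwapStep ch (a :: done ++ p :: ps') (done.length + 1) =
        (a.set ch (p.getD ch 0)) :: done ++ (p.set ch (a.getD ch 0)) :: ps' := by
      simp only [pvSwapStep]
      simp [pv_getD_append, pv_set_append, List.getD_cons_succ, List.set_cons_succ]
    have hlen' : ch < (a.set ch (p.getD ch 0)).length := by simpa using ha
    have hrange : List.range' (done.length + 1) (p :: ps').length =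
        (done.length + 1) :: List.range' (done.length + 2) ps'.length := by
      simp [List.range'_succ]
    rw [hrange]
    simp only [List.foldl_cons, hstep]
    have hps' : ∀ q ∈ ps', ch < q.length := fun q hq => hp q (List.mem_cons_of_mem _ hq)
    have := ih (done ++ [p.set ch (a.getD ch 0)]) (a.set ch (p.getD ch 0)) hlen' hps'
    simp only [List.length_append, List.length_cons, List.length_nil, Nat.add_zero] at this
    rw [show done.length + 1 + 1 = done.length + 2 by omega] at this
    have hshape : (a.set ch (p.getD ch 0) :: done ++ (p.set ch (a.getD ch 0)) :: ps' :
        List (List Int)) =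
        a.set ch (p.getD ch 0) :: (done ++ [p.set ch (a.getD ch 0)]) ++ ps' := by simp
    rw [hshape, this]
    have hgd : (a.set ch (p.getD ch 0)).getD ch 0 = p.getD ch 0 := by
      simp [List.getD, List.getElem?_set_self', List.getElem?_eq_getElem ha]
    rw [hgd]
    simp only [List.set_set, List.getLastD_cons, List.map_cons]
    cases ps' with
    | nil => simp
    | cons q rest => simp

theorem pvRowA_eq_pvRowB (ch : Nat) (row : List (List Int)) (hne : row ≠ [])
    (hp : ∀ p ∈ row, ch < p.length) : pvRowA ch row = pvRowB ch row := by
  match row, hne with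
  | a :: ps, _ =>
    have ha : ch < a.length := hp a (List.mem_cons_self)
    have hps : ∀ p ∈ ps, ch < p.length := fun p h => hp p (List.mem_cons_of_mem _ h)
    have h0 : pvSwapStep ch (a :: ps) 0 = (a.set ch (a.getD ch 0)) :: ps := by
      simp [pvSwapStep, List.set_set]
    have hstart : pvRowA ch (a :: ps) =
        List.foldl (pvSwapStep ch) ((a.set ch (a.getD ch 0)) :: ps) (List.range' 1 ps.length) := by
      simp only [pvRowA, List.length_cons, List.range_eq_range', List.range'_succ,
        List.foldl_cons, h0]
    have hlen' : ch < (a.set ch (a.getD ch 0)).length := by simpa using ha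
    have hinv := pvRowA_inv ch ps [] (a.set ch (a.getD ch 0)) hlen' hps
    have hgd : (a.set ch (a.getD ch 0)).getD ch 0 = a.getD ch 0 := by
      simp [List.getD, List.getElem?_set_self', List.getElem?_eq_getElem ha]
    rw [hgd] at hinv
    simp only [List.length_nil, Nat.zero_add, List.singleton_append, List.nil_append] at hinv
    rw [hstart, hinv]
    simp only [pvRowB, List.map_cons, List.getLastD_cons, List.set_set]
    cases ps with
    | nil => simp
    | cons q rest => simp

theorem pvOuter (ch : Nat) :
    ∀ (suf pre : List (List (List Int))),
      (∀ row ∈ suf, row ≠ [] ∧ ∀ p ∈ row, ch < p.length) →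
      List.foldl (pvOuterStepA ch) (pre ++ suf) (List.range' pre.length suf.length) =
        pre ++ suf.map (pvRowB ch) := by
  intro suf
  induction suf with
  | nil => intro pre _; simp
  | cons r rest ih =>
    intro pre h
    have hr := h r (List.mem_cons_self)
    have hrest : ∀ row ∈ rest, row ≠ [] ∧ ∀ p ∈ row, ch < p.length :=
      fun row hm => h row (List.mem_cons_of_mem _ hm)
    have hstep : pvOuterStepA ch (pre ++ r :: rest) pre.length =
        pre ++ (pvRowB ch r) :: rest := by
      simp only [pvOuterStepA, pv_getD_append, pv_set_append,
        pvRowA_eq_pvRowB ch r hr.1 hr.2]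
      have hne : (pre.length == (pre ++ pvRowB ch r :: rest).length) = false := by
        simp
      rw [hne]
      simp
    rw [List.length_cons, List.range'_succ, List.foldl_cons, hstep]
    have := ih (pre ++ [pvRowB ch r]) hrest
    simp only [List.length_append, List.length_cons, List.length_nil, Nat.add_zero,
      List.append_assoc, List.singleton_append] at this
    rw [show pre.length + 1 = pre.length + 1 from rfl]
    simpa using this

-- ===== VERDICT (by name: the statement is the Claim_ definition above) =====
theorem rgb_offset_spec : Claim_equal_rgb_offset := by
  intro array mode _ hpre
  unfold Spec_rgb_offset rgb_offset rgb_offset_alt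
  have h := pvOuter (pvChan mode) array [] (fun row hm => hpre row hm)
  simpa [pvChan, List.range_eq_range'] using h
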